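-- pv_equiv track=rewrite | github.com/ShrohanMohapatra/LaunchpadACT | nonArithmeticDivision.py | DivisionBy7
-- ===== SOURCE A (Python) =====
-- def DivisionBy7(x,n):
--     # Division by 7 from the user inputs x and n ....
--     # Perform long division to find the quotient s=int(x/7) and r=x%7 ....
--     x = int(x)
--     n = int(n)
--     s,r = 0,x
--     while r>=7:
--         r = x - 7
--         s = s + 1
--         x = r
--     # Now I am storing the repetitive digits in the array
--     # ListOfRemainders for decimal representation of x/7
--     # where 0<=x<=6 ....
--     ListOfRemainders = [
--         [0,0,0,0,0,0],
--         [1,4,2,8,5,7],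
--         [2,8,5,7,1,4],
--         [4,2,8,5,7,1],
--         [5,7,1,4,2,8],
--         [7,1,4,2,8,5],
--         [8,5,7,1,4,2]
--     ]
--     # Now I am simply going to import the ListOfRemainders from here ....
--     decimalPoints = []
--     for k in range(n): decimalPoints.append(ListOfRemainders[x][k%6])
--     return s,decimalPoints
-- ===== SOURCE B (Python) =====
-- def DivisionBy7(x, n):
--     # no lookup table: quotient via divmod, digits by decimal long division carrying the remainder
--     x = int(x)
--     n = int(n)
--     s, r = divmod(x, 7)
--     digits = []
--     for _ in range(n):
--         d, r = divmod(10 * r, 7)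
--         digits.append(d)
--     return s, digits
-- ===== Notes on version B (the rewrite author's own statement) =====
-- stated objective: alternative
-- what changed: Replaces the repeated-subtraction quotient loop by one divmod(x,7) and drops the hard-coded digit table entirely: the n digits are generated by decimal long division, carrying the remainder (d,r = divmod(10*r,7)) instead of indexing a precomputed row by k%6.
-- outside the precondition, e.g. on DivisionBy7(-3, 2): A returns (0, [5, 7]), B returns (-1, [5, 7]); on DivisionBy7(-8, 2): A raises IndexError, B returns (-2, [8, 5])
import Mathlib
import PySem

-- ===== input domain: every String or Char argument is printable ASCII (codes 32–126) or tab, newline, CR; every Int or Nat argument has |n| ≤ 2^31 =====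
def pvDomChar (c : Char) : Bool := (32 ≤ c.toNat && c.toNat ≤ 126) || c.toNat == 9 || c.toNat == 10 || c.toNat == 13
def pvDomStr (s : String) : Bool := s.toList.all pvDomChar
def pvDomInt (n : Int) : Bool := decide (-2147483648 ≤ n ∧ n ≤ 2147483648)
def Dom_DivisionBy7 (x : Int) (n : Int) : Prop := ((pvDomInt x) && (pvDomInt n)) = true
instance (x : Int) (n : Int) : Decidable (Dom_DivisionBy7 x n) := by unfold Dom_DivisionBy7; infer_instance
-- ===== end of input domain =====

-- B replaces A's repeated-subtraction loop by one divmod and drops A's digit table: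
-- digits come from decimal long division carrying the remainder; return value only.

-- ===== PORT A =====
-- the while loop: r and x are equal at every test (r=x initially, x=r after each body)
def pvLoopA (x : Int) (s : Int) : Int × Int :=
  if 7 ≤ x then pvLoopA (x - 7) (s + 1) else (s, x)
termination_by x.toNat
decreasing_by omega

def DivisionBy7 (x : Int) (n : Int) : Int × List Int :=
  let p := pvLoopA x 0
  let s := p.1
  let x' := p.2
  let listOfRemainders : List (List Int) :=
    [[0,0,0,0,0,0],[1,4,2,8,5,7],[2,8,5,7,1,4],[4,2,8,5,7,1],[5,7,1,4,2,8],[7,1,4,2,8,5],[8,5,7,1,4,2]]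
  -- ListOfRemainders[x] raises IndexError when pyGet? = none; those inputs are outside Pre_
  let row := (PySem.List.pyGet? listOfRemainders x').getD []
  let decimalPoints :=
    (PySem.List.pyRange 0 n 1).foldl
      (fun acc k => acc ++ [PySem.List.pyGetD row (PySem.Int.mod k 6) 0]) []
  (s, decimalPoints)

-- ===== PORT B =====
def DivisionBy7_alt (x : Int) (n : Int) : Int × List Int :=
  let s := PySem.Int.floordiv x 7
  let r := PySem.Int.mod x 7
  -- 'for _ in range(n): d, r = divmod(10*r, 7); digits.append(d)' as a fold over the state (r, digits)
  let p := (PySem.List.pyRange 0 n 1).foldl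
      (fun (st : Int × List Int) _ =>
        (PySem.Int.mod (10 * st.1) 7, st.2 ++ [PySem.Int.floordiv (10 * st.1) 7]))
      (r, [])
  (s, p.2)

-- ===== PRECONDITION & SPEC =====
-- Pre_ excludes negative x: for x < -7 A raises IndexError, and for -7 ≤ x < 0 A's zero
-- quotient and negative-wraparound row choice are accidents of its loop and list indexing.
def Pre_DivisionBy7 (x : Int) (n : Int) : Prop := 0 ≤ x
instance (x : Int) (n : Int) : Decidable (Pre_DivisionBy7 x n) := by unfold Pre_DivisionBy7; infer_instance
def pvWitness_DivisionBy7 : Int × Int := (23, 8)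

def Spec_DivisionBy7 (x : Int) (n : Int) (out : Int × List Int) : Prop := out = DivisionBy7_alt x n
instance (x : Int) (n : Int) (out : Int × List Int) : Decidable (Spec_DivisionBy7 x n out) := by unfold Spec_DivisionBy7; infer_instance

-- ===== CLAIM (what is proved, stated in full; the proofs are below) =====
def Claim_equal_DivisionBy7 : Prop := ∀ (x : Int) (n : Int), Dom_DivisionBy7 x n → Pre_DivisionBy7 x n → Spec_DivisionBy7 x n (DivisionBy7 x n)

-- ===== LEMMAS AND PROOFS =====

-- A's subtraction loop computes floor-divmod by 7
theorem pvLoopA_eq_ediv (t : Nat) (x : Int) (s : Int) (hx : 0 ≤ x) (ht : x.toNat = t) :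
    pvLoopA x s = (s + x / 7, x % 7) := by
  induction t using Nat.strong_induction_on generalizing x s with
  | _ t ih =>
    rw [pvLoopA]
    split
    · rename_i h7
      rw [ih (x - 7).toNat (by omega) (x - 7) (s + 1) (by omega) rfl]
      have h1 : s + 1 + (x - 7) / 7 = s + x / 7 := by omega
      have h2 : (x - 7) % 7 = x % 7 := by omega
      rw [h1, h2]
    · rename_i h7
      have h1 : x / 7 = 0 := by omega
      have h2 : x % 7 = x := by omega
      rw [h1, h2, add_zero]

theorem pvLoopA_eq (x : Int) (s : Int) (hx : 0 ≤ x) :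
    pvLoopA x s = (s + PySem.Int.floordiv x 7, PySem.Int.mod x 7) := by
  rw [PySem.Int.floordiv_eq_ediv_of_pos (by omega), PySem.Int.mod_eq_emod_of_pos (by omega)]
  exact pvLoopA_eq_ediv x.toNat x s hx rfl

-- A's row, as a function of the remainder r and a Nat index
def pvRow (r : Int) (j : Nat) : Int :=
  ((PySem.List.pyGet?
    ([[0,0,0,0,0,0],[1,4,2,8,5,7],[2,8,5,7,1,4],[4,2,8,5,7,1],[5,7,1,4,2,8],[7,1,4,2,8,5],[8,5,7,1,4,2]] : List (List Int)) r).getD []).getD j 0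

-- one long-division step: the produced digit is the head of A's row …
theorem pvRow_head (r : Int) (h0 : 0 ≤ r) (h7 : r < 7) :
    pvRow r (0 % 6) = PySem.Int.floordiv (10 * r) 7 := by
  interval_cases r <;> decide

-- … and the row of the next remainder is A's row shifted by one
theorem pvRow_step (r : Int) (h0 : 0 ≤ r) (h7 : r < 7) (k : Nat) :
    pvRow r ((k + 1) % 6) = pvRow (PySem.Int.mod (10 * r) 7) (k % 6) := by
  have hj : k % 6 < 6 := Nat.mod_lt _ (by omega)
  have hk : (k + 1) % 6 = (k % 6 + 1) % 6 := by omega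
  rw [hk]
  set j := k % 6 with hjdef
  clear_value j
  interval_cases r <;> interval_cases j <;> decide

-- B's fold produces exactly A's periodic row digits (the fold ignores the range elements)
theorem pvFoldB (l : List Int) (r : Int) (acc : List Int) (h0 : 0 ≤ r) (h7 : r < 7) :
    (l.foldl
      (fun (st : Int × List Int) _ =>
        (PySem.Int.mod (10 * st.1) 7, st.2 ++ [PySem.Int.floordiv (10 * st.1) 7]))
      (r, acc)).2 = acc ++ (List.range l.length).map (fun k => pvRow r (k % 6)) := by
  induction l generalizing r acc with
  | nil => simp
  | cons a l ih =>
    have hr0 : 0 ≤ PySem.Int.mod (10 * r) 7 := PySem.Int.mod_nonneg _ (by norm_num)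
    have hr7 : PySem.Int.mod (10 * r) 7 < 7 := PySem.Int.mod_lt _ (by norm_num)
    rw [List.foldl_cons, ih _ _ hr0 hr7]
    rw [List.length_cons, List.range_succ_eq_map, List.map_cons, List.map_map]
    have hmap : (List.range l.length).map ((fun k => pvRow r (k % 6)) ∘ Nat.succ) =
        (List.range l.length).map (fun k => pvRow (PySem.Int.mod (10 * r) 7) (k % 6)) := by
      apply List.map_congr_left
      intro k _
      simpa using pvRow_step r h0 h7 k
    rw [hmap, pvRow_head r h0 h7, List.append_assoc, List.singleton_append]

-- ===== VERDICT (by name: the statement is the Claim_ definition above) =====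
theorem DivisionBy7_spec : Claim_equal_DivisionBy7 := by
  intro x n _ hx
  unfold Spec_DivisionBy7
  have hx' : (0:Int) ≤ x := hx
  simp only [DivisionBy7, DivisionBy7_alt, pvLoopA_eq x 0 hx', zero_add]
  have hr0 : 0 ≤ PySem.Int.mod x 7 := PySem.Int.mod_nonneg x (by norm_num)
  have hr7 : PySem.Int.mod x 7 < 7 := PySem.Int.mod_lt x (by norm_num)
  refine Prod.ext rfl ?_
  -- A side: foldl-append is a map over the range; the periodic lookup is pvRow
  rw [PySem.List.foldl_append_singleton_eq_map, PySem.List.pyRange_one, List.map_map]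
  have hA : (List.range (n - 0).toNat).map
      ((fun k => PySem.List.pyGetD
          ((PySem.List.pyGet?
            ([[0,0,0,0,0,0],[1,4,2,8,5,7],[2,8,5,7,1,4],[4,2,8,5,7,1],[5,7,1,4,2,8],[7,1,4,2,8,5],[8,5,7,1,4,2]] : List (List Int))
            (PySem.Int.mod x 7)).getD []) (PySem.Int.mod k 6) 0) ∘ (fun k : Nat => (0:Int) + k)) =
      (List.range n.toNat).map (fun k => pvRow (PySem.Int.mod x 7) (k % 6)) := by
    have hn : (n - 0).toNat = n.toNat := by omega
    rw [hn]
    apply List.map_congr_left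
    intro k _
    have hmod : PySem.Int.mod ((0:Int) + (k:Int)) 6 = ((k % 6 : Nat) : Int) := by
      rw [zero_add]; exact_mod_cast PySem.Int.mod_natCast k 6
    simp only [Function.comp_apply]
    rw [hmod, PySem.List.pyGetD_natCast]
    rfl
  rw [hA]
  -- B side: the state-carrying fold also ignores its range elements
  rw [pvFoldB _ _ _ hr0 hr7, List.nil_append]
  simp only [List.length_map, List.length_range]
  have hn : (n - 0).toNat = n.toNat := by omega
  rw [hn]
  rfl
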